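-- pv_equiv track=rewrite | github.com/JoaoESmoreira/CE-Project | src/aco.py | population_diversity
-- ===== SOURCE A (Python) =====
-- def hamming_distance(individual1, individual2):
--     min_len = min(len(individual1), len(individual2))
--     max_len = max(len(individual1), len(individual2))
--
--     distance = max_len - min_len
--     for i in range(min_len):
--         distance += abs(individual1[i] - individual2[i])
--     return distance
--
-- def population_diversity(population):
--     total_distance = 0
--     num_pairs = 0
--     for i in range(len(population)):
--         for j in range(i+1, len(population)):
--             total_distance += hamming_distance(population[i], population[j])
--             num_pairs += 1
--     return int(total_distance / num_pairs)
-- ===== SOURCE B (Python) =====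
-- def population_diversity(population):
--     n = len(population)
--     num_pairs = n * (n - 1) // 2
--     total_distance = _pairwise_abs_sum([len(ind) for ind in population])
--     max_len = 0
--     for ind in population:
--         if len(ind) > max_len:
--             max_len = len(ind)
--     for p in range(max_len):
--         total_distance += _pairwise_abs_sum([ind[p] for ind in population if len(ind) > p])
--     return int(total_distance / num_pairs)
--
-- def _pairwise_abs_sum(values):
--     values = sorted(values)
--     total = 0
--     prefix = 0
--     i = 0
--     for v in values:
--         total += i * v - prefix
--         prefix += v
--         i += 1
--     return total
-- ===== Notes on version B (the rewrite author's own statement) =====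
-- stated objective: faster
-- what changed: Replaces the O(n^2) double loop over pairs by a per-position (and per-length) sort + prefix-sum computation of all pairwise absolute-difference sums.
import Mathlib
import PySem

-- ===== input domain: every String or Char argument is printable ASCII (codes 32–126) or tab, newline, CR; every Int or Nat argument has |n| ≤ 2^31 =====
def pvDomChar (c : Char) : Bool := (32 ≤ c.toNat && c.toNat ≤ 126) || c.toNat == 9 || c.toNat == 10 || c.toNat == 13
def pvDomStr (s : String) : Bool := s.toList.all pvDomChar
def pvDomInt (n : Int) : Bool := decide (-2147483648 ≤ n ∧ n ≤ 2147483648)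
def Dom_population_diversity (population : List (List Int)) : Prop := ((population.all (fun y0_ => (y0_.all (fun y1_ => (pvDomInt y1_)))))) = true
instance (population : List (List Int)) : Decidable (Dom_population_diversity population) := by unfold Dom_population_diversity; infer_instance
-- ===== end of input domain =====

-- B replaces A's O(n^2) double loop over pairs by per-position (and per-length) sort + prefix-sum
-- computation of pairwise absolute-difference sums (measurably faster); return values proved equal.


-- Hand-written model of CPython's `int(a / b)` (true float division, then truncation), used by the
-- final line of BOTH Pythons. Exact for 0 ≤ a and 0 < b with a/b in the normal double range (the
-- only values reachable here: a is a sum of absolute values, b a positive pair count): it computes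
-- the round-to-nearest-even 53-bit significand of a/b and truncates.
def pyIntDivFloat (a b : Int) : Int :=
  if a = 0 then 0
  else
    let d : Int := (PySem.Int.bitLength a : Int) - (PySem.Int.bitLength b : Int)
    let f : Int := if b * 2 ^ d.toNat ≤ a * 2 ^ (-d).toNat then d else d - 1
    let k : Int := 52 - f
    let num := a * 2 ^ k.toNat
    let den := b * 2 ^ (-k).toNat
    let q := PySem.Int.floordiv num den
    let r := num - q * den
    let q' := if den < 2 * r ∨ (2 * r = den ∧ PySem.Int.mod q 2 = 1) then q + 1 else q
    if 0 ≤ k then PySem.Int.floordiv q' (2 ^ k.toNat) else q' * 2 ^ (-k).toNat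

-- ===== PORT A =====
def hamming_distance (individual1 individual2 : List Int) : Int :=
  let min_len := min (PySem.List.len individual1) (PySem.List.len individual2)
  let max_len := max (PySem.List.len individual1) (PySem.List.len individual2)
  let distance := max_len - min_len
  (PySem.List.pyRange 0 min_len 1).foldl
    (fun dist i => dist + |PySem.List.pyGetD individual1 i 0 - PySem.List.pyGetD individual2 i 0|)
    distance

def population_diversity (population : List (List Int)) : Int :=
  let n := PySem.List.len population
  let st :=
    (PySem.List.pyRange 0 n 1).foldl
      (fun (s : Int × Int) i =>
        (PySem.List.pyRange (i + 1) n 1).foldl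
          (fun (s : Int × Int) j =>
            (s.1 + hamming_distance (PySem.List.pyGetD population i [])
                (PySem.List.pyGetD population j []),
             s.2 + 1))
          s)
      (0, 0)
  pyIntDivFloat st.1 st.2

-- ===== PORT B =====
def pairwiseAbsSum (values : List Int) : Int :=
  let sortedValues := PySem.List.sorted values (fun v => v) false
  let st := sortedValues.foldl
    (fun (s : Int × Int × Int) v => (s.1 + s.2.2 * v - s.2.1, s.2.1 + v, s.2.2 + 1))
    (0, 0, 0)
  st.1

def population_diversity_alt (population : List (List Int)) : Int :=
  let n := PySem.List.len population
  let num_pairs := PySem.Int.floordiv (n * (n - 1)) 2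
  let total0 := pairwiseAbsSum (population.map (fun ind => PySem.List.len ind))
  let max_len := population.foldl
    (fun m ind => if PySem.List.len ind > m then PySem.List.len ind else m) 0
  let total :=
    (PySem.List.pyRange 0 max_len 1).foldl
      (fun t p =>
        t + pairwiseAbsSum
          ((population.filter (fun ind => decide (p < PySem.List.len ind))).map
            (fun ind => PySem.List.pyGetD ind p 0)))
      total0
  pyIntDivFloat total num_pairs

-- ===== PRECONDITION & SPEC =====
-- Pre_ excludes exactly the inputs with fewer than two individuals, on which A raises ZeroDivisionError.
def Pre_population_diversity (population : List (List Int)) : Prop := 2 ≤ population.length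
instance (population : List (List Int)) : Decidable (Pre_population_diversity population) := by
  unfold Pre_population_diversity; infer_instance
def pvWitness_population_diversity : List (List Int) := [[1], [2, 3]]

def Spec_population_diversity (population : List (List Int)) (out : Int) : Prop :=
  out = population_diversity_alt population
instance (population : List (List Int)) (out : Int) : Decidable (Spec_population_diversity population out) := by
  unfold Spec_population_diversity; infer_instance

-- ===== CLAIM (what is proved, stated in full; the proofs are below) =====
def Claim_equal_population_diversity : Prop :=
  ∀ (population : List (List Int)), Dom_population_diversity population →
    Pre_population_diversity population →
    Spec_population_diversity population (population_diversity population)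

-- ===== LEMMAS AND PROOFS =====

-- Sum of f over all unordered pairs, recursing on the list.
def pairRec {α : Type} (f : α → α → Int) : List α → Int
  | [] => 0
  | x :: xs => (xs.map (f x)).sum + pairRec f xs

lemma sum_map_sub_right (xs : List Int) (x : Int) :
    (xs.map (fun y => y - x)).sum = xs.sum - xs.length * x := by
  induction xs with
  | nil => simp
  | cons a t ih => simp [ih]; ring

lemma pairRec_add {α : Type} (f g : α → α → Int) (l : List α) :
    pairRec f l + pairRec g l = pairRec (fun x y => f x y + g x y) l := by
  induction l with
  | nil => simp [pairRec]
  | cons x xs ih =>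
    simp only [pairRec]
    rw [← ih, PySem.List.sum_map_add_int (f := fun y => f x y) (g := fun y => g x y)]
    ring

lemma pairRec_map {α β : Type} (f : β → β → Int) (g : α → β) (l : List α) :
    pairRec f (l.map g) = pairRec (fun x y => f (g x) (g y)) l := by
  induction l with
  | nil => simp [pairRec]
  | cons x xs ih => simp only [List.map_cons, pairRec, List.map_map, ih]; rfl

lemma pairRec_congr {α : Type} {f g : α → α → Int} {l : List α}
    (h : ∀ x ∈ l, ∀ y ∈ l, f x y = g x y) : pairRec f l = pairRec g l := by
  induction l with
  | nil => rfl
  | cons x xs ih =>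
    simp only [pairRec]
    rw [List.map_congr_left (fun y hy => h x (by simp) y (by simp [hy])),
      ih (fun a ha b hb => h a (by simp [ha]) b (by simp [hb]))]

lemma pairRec_perm {α : Type} {f : α → α → Int} (hsym : ∀ a b, f a b = f b a)
    {l l' : List α} (h : l.Perm l') : pairRec f l = pairRec f l' := by
  induction h with
  | nil => rfl
  | cons x h ih =>
    simp only [pairRec, ih]
    rw [(h.map (f x)).sum_eq]
  | swap x y l =>
    simp only [pairRec, List.map_cons, List.sum_cons]
    rw [hsym y x]; ring
  | trans _ _ ih1 ih2 => rw [ih1, ih2]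

lemma pairRec_sorted_sub_eq_abs (s : List Int) (hs : s.Pairwise (· ≤ ·)) :
    pairRec (fun a b => b - a) s = pairRec (fun a b => |a - b|) s := by
  induction s with
  | nil => rfl
  | cons x xs ih =>
    rcases List.pairwise_cons.mp hs with ⟨hx, ht⟩
    simp only [pairRec, ih ht]
    congr 1
    refine congrArg List.sum (List.map_congr_left (fun y hy => ?_))
    have h1 : x ≤ y := hx y hy
    rw [abs_sub_comm, abs_of_nonneg (by omega)]

lemma pairwiseAbsSum_fold (s : List Int) (t pre i : Int) :
    (s.foldl (fun (st : Int × Int × Int) v => (st.1 + st.2.2 * v - st.2.1, st.2.1 + v, st.2.2 + 1))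
      (t, pre, i)).1 = t + pairRec (fun a b => b - a) s + i * s.sum - s.length * pre := by
  induction s generalizing t pre i with
  | nil => simp [pairRec]
  | cons x xs ih =>
    simp only [List.foldl_cons, ih, pairRec, sum_map_sub_right, List.sum_cons, List.length_cons]
    push_cast
    ring

lemma pairwiseAbsSum_eq (values : List Int) :
    pairwiseAbsSum values = pairRec (fun a b => |a - b|) values := by
  unfold pairwiseAbsSum
  rw [pairwiseAbsSum_fold]
  have hp : (PySem.List.sorted values (fun v => v) false).Pairwise (· ≤ ·) :=
    PySem.List.sorted_pairwise values (fun v => v)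
  rw [pairRec_sorted_sub_eq_abs _ hp]
  simp [pairRec_perm (f := fun a b => |a - b|) (fun a b => abs_sub_comm a b)
    (PySem.List.sorted_perm values (fun v => v) false)]

lemma sum_map_filter_ite {α : Type} (q : α → Bool) (h : α → Int) (xs : List α) :
    ((xs.filter q).map h).sum = (xs.map (fun y => if q y then h y else 0)).sum := by
  induction xs with
  | nil => rfl
  | cons a t ih => by_cases hq : q a <;> simp [hq, ih]

lemma pairRec_filter {α : Type} (f : α → α → Int) (q : α → Bool) (l : List α) :
    pairRec f (l.filter q) = pairRec (fun x y => if q x && q y then f x y else 0) l := by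
  induction l with
  | nil => rfl
  | cons x xs ih =>
    rw [List.filter_cons]
    by_cases hq : q x
    · rw [if_pos hq]
      have hcons : pairRec f (x :: xs.filter q)
          = ((xs.filter q).map (f x)).sum + pairRec f (xs.filter q) := rfl
      have hcons' : pairRec (fun a b => if q a && q b then f a b else 0) (x :: xs)
          = (xs.map (fun y => if q x && q y then f x y else 0)).sum
            + pairRec (fun a b => if q a && q b then f a b else 0) xs := rfl
      rw [hcons, hcons', ih, sum_map_filter_ite]
      congr 1
      refine congrArg List.sum (List.map_congr_left (fun y _ => ?_))
      simp [hq]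
    · rw [if_neg hq, ih]
      have hcons' : pairRec (fun a b => if q a && q b then f a b else 0) (x :: xs)
          = (xs.map (fun y => if q x && q y then f x y else 0)).sum
            + pairRec (fun a b => if q a && q b then f a b else 0) xs := rfl
      have hz : (xs.map (fun y => if q x && q y then f x y else 0)).sum = 0 := by
        apply List.sum_eq_zero
        intro a ha
        rcases List.mem_map.mp ha with ⟨y, _, rfl⟩
        simp [hq]
      rw [hcons', hz, zero_add]

lemma sum_sum_comm {α β : Type} (ps : List α) (xs : List β) (g : α → β → Int) :
    (ps.map (fun p => (xs.map (fun y => g p y)).sum)).sum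
      = (xs.map (fun y => (ps.map (fun p => g p y)).sum)).sum := by
  induction ps with
  | nil => simp
  | cons p pt ih =>
    simp only [List.map_cons, List.sum_cons, ih,
      ← PySem.List.sum_map_add_int (f := fun y => g p y)
        (g := fun y => (pt.map (fun p => g p y)).sum)]

lemma pairRec_list_sum {α β : Type} (ps : List α) (F : α → β → β → Int) (l : List β) :
    (ps.map (fun p => pairRec (F p) l)).sum
      = pairRec (fun x y => (ps.map (fun p => F p x y)).sum) l := by
  induction l with
  | nil => simp [pairRec]
  | cons x xs ih =>
    simp only [pairRec]
    rw [← ih, PySem.List.sum_map_add_int (f := fun p => ((xs.map (F p x)).sum))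
      (g := fun p => pairRec (F p) xs)]
    congr 1
    rw [sum_sum_comm ps xs (fun p y => F p x y)]

-- the index j runs over [pre.length, pre.length + l.length); reading (pre ++ l)[j] yields l itself
lemma map_pyGetD_range {α : Type} (l : List α) (pre : List α) (d : α) :
    (PySem.List.pyRange (pre.length : Int) ((pre.length : Int) + l.length) 1).map
      (fun j => PySem.List.pyGetD (pre ++ l) j d) = l := by
  induction l generalizing pre with
  | nil => rw [PySem.List.pyRange_one_eq_nil (by simp)]; rfl
  | cons x xs ih =>
    rw [PySem.List.pyRange_one_cons
      (by simp only [List.length_cons, Nat.cast_add, Nat.cast_one]; omega)]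
    simp only [List.map_cons]
    have h1 : ((pre.length : Int) + 1) = (((pre ++ [x]).length : Nat) : Int) := by
      simp
    have h2 : ((pre.length : Int) + ((x :: xs).length : Int))
        = (((pre ++ [x]).length : Nat) : Int) + (xs.length : Int) := by
      simp; ring
    have h3 : pre ++ x :: xs = (pre ++ [x]) ++ xs := by simp
    congr 1
    · rw [PySem.List.pyGetD_natCast]
      simp [List.getD]
    · rw [h1, h2, h3]
      exact ih (pre ++ [x])

lemma double_loop_sum {α : Type} (f : α → α → Int) (d : α) (l pre : List α) :
    ((PySem.List.pyRange (pre.length : Int) ((pre.length : Int) + l.length) 1).map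
      (fun i => ((PySem.List.pyRange (i + 1) ((pre.length : Int) + l.length) 1).map
        (fun j => f (PySem.List.pyGetD (pre ++ l) i d)
          (PySem.List.pyGetD (pre ++ l) j d))).sum)).sum
      = pairRec f l := by
  induction l generalizing pre with
  | nil => rw [PySem.List.pyRange_one_eq_nil (by simp)]; rfl
  | cons x xs ih =>
    rw [PySem.List.pyRange_one_cons
      (by simp only [List.length_cons, Nat.cast_add, Nat.cast_one]; omega)]
    simp only [List.map_cons, List.sum_cons]
    have hx : PySem.List.pyGetD (pre ++ x :: xs) ((pre.length : Int)) d = x := by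
      rw [PySem.List.pyGetD_natCast]
      simp [List.getD]
    have h1 : ((pre.length : Int) + 1) = (((pre ++ [x]).length : Nat) : Int) := by
      simp
    have h2 : ((pre.length : Int) + ((x :: xs).length : Int))
        = (((pre ++ [x]).length : Nat) : Int) + (xs.length : Int) := by
      simp; ring
    have h3 : pre ++ x :: xs = (pre ++ [x]) ++ xs := by simp
    have hrec : pairRec f (x :: xs) = (xs.map (f x)).sum + pairRec f xs := rfl
    rw [hrec]
    congr 1
    · rw [hx, h1, h2, h3]
      have hcomp : (PySem.List.pyRange (((pre ++ [x]).length : Nat) : Int)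
            ((((pre ++ [x]).length : Nat) : Int) + (xs.length : Int)) 1).map
          (fun j => f x (PySem.List.pyGetD ((pre ++ [x]) ++ xs) j d))
          = ((PySem.List.pyRange (((pre ++ [x]).length : Nat) : Int)
            ((((pre ++ [x]).length : Nat) : Int) + (xs.length : Int)) 1).map
            (fun j => PySem.List.pyGetD ((pre ++ [x]) ++ xs) j d)).map (f x) := by
        rw [List.map_map]
        rfl
      rw [hcomp, map_pyGetD_range]
    · rw [h1, h2, h3]
      exact ih (pre ++ [x])

lemma double_loop_sum' {α : Type} (f : α → α → Int) (d : α) (l : List α) :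
    ((PySem.List.pyRange 0 (PySem.List.len l) 1).map
      (fun i => ((PySem.List.pyRange (i + 1) (PySem.List.len l) 1).map
        (fun j => f (PySem.List.pyGetD l i d) (PySem.List.pyGetD l j d))).sum)).sum
      = pairRec f l := by
  have h := double_loop_sum f d l []
  simpa [PySem.List.len_eq] using h

lemma pairRec_ones {α : Type} (l : List α) :
    2 * pairRec (fun _ _ => (1 : Int)) l = l.length * (l.length - 1) := by
  induction l with
  | nil => simp [pairRec]
  | cons x xs ih =>
    have hrec : pairRec (fun _ _ => (1 : Int)) (x :: xs)
        = (xs.map (fun _ => (1 : Int))).sum + pairRec (fun _ _ => (1 : Int)) xs := rfl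
    rw [hrec, PySem.List.sum_map_const_int]
    simp only [List.length_cons]
    push_cast
    push_cast at ih
    nlinarith [ih]

lemma num_pairs_eq (pop : List (List Int)) :
    PySem.Int.floordiv (PySem.List.len pop * (PySem.List.len pop - 1)) 2
      = pairRec (fun _ _ => (1 : Int)) pop := by
  have h := pairRec_ones pop
  rw [PySem.List.len_eq, ← h, PySem.Int.floordiv_eq_ediv_of_pos (by norm_num)]
  exact Int.mul_ediv_cancel_left _ (by norm_num)

lemma max_len_spec (population : List (List Int)) :
    ∀ ind ∈ population, PySem.List.len ind ≤
      population.foldl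
        (fun m ind => if PySem.List.len ind > m then PySem.List.len ind else m) 0 := by
  have hfe : (fun (m : Int) (ind : List Int) =>
      if PySem.List.len ind > m then PySem.List.len ind else m)
      = fun m ind => max m (PySem.List.len ind) := by
    funext m ind
    rw [max_def_lt]
  rw [hfe]
  exact (PySem.List.le_foldl_max_int population (fun ind => PySem.List.len ind) 0).2

lemma hamming_distance_eq (x y : List Int) :
    hamming_distance x y = |PySem.List.len x - PySem.List.len y|
      + ((PySem.List.pyRange 0 (min (PySem.List.len x) (PySem.List.len y)) 1).map
          (fun i => |PySem.List.pyGetD x i 0 - PySem.List.pyGetD y i 0|)).sum := by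
  simp only [hamming_distance]
  rw [PySem.List.foldl_add]
  congr 1
  rw [abs_sub_comm]
  exact max_sub_min_eq_abs (PySem.List.len x) (PySem.List.len y)

-- summed over all positions below a bound on both lengths, the guarded per-position
-- contribution of a pair is the positional part of the hamming distance
lemma column_contrib (x y : List Int) (M : Int)
    (hx : PySem.List.len x ≤ M) (_hy : PySem.List.len y ≤ M) :
    ((PySem.List.pyRange 0 M 1).map
      (fun p => if decide (p < PySem.List.len x) && decide (p < PySem.List.len y)
        then |PySem.List.pyGetD x p 0 - PySem.List.pyGetD y p 0| else 0)).sum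
    = ((PySem.List.pyRange 0 (min (PySem.List.len x) (PySem.List.len y)) 1).map
        (fun i => |PySem.List.pyGetD x i 0 - PySem.List.pyGetD y i 0|)).sum := by
  have hlx : PySem.List.len x = (x.length : Int) := PySem.List.len_eq x
  have hly : PySem.List.len y = (y.length : Int) := PySem.List.len_eq y
  have hm0 : 0 ≤ min (PySem.List.len x) (PySem.List.len y) := by
    rw [hlx, hly]; positivity
  have hmM : min (PySem.List.len x) (PySem.List.len y) ≤ M :=
    le_trans (min_le_left _ _) hx
  rw [PySem.List.pyRange_one_append 0 (min (PySem.List.len x) (PySem.List.len y)) M hm0 hmM,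
    List.map_append, List.sum_append]
  have hfirst : ((PySem.List.pyRange 0 (min (PySem.List.len x) (PySem.List.len y)) 1).map
      (fun p => if decide (p < PySem.List.len x) && decide (p < PySem.List.len y)
        then |PySem.List.pyGetD x p 0 - PySem.List.pyGetD y p 0| else 0)).sum
      = ((PySem.List.pyRange 0 (min (PySem.List.len x) (PySem.List.len y)) 1).map
        (fun i => |PySem.List.pyGetD x i 0 - PySem.List.pyGetD y i 0|)).sum := by
    refine congrArg List.sum (List.map_congr_left (fun p hp => ?_))
    rcases (PySem.List.mem_pyRange_one).mp hp with ⟨_, hp2⟩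
    have c1 : p < (x.length : Int) := by
      rw [← hlx]; exact lt_of_lt_of_le hp2 (min_le_left _ _)
    have c2 : p < (y.length : Int) := by
      rw [← hly]; exact lt_of_lt_of_le hp2 (min_le_right _ _)
    simp [c1, c2]
  have hsecond : ((PySem.List.pyRange (min (PySem.List.len x) (PySem.List.len y)) M 1).map
      (fun p => if decide (p < PySem.List.len x) && decide (p < PySem.List.len y)
        then |PySem.List.pyGetD x p 0 - PySem.List.pyGetD y p 0| else 0)).sum = 0 := by
    apply List.sum_eq_zero
    intro a ha
    rcases List.mem_map.mp ha with ⟨p, hp, rfl⟩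
    rcases (PySem.List.mem_pyRange_one).mp hp with ⟨hp1, _⟩
    have : ¬ (p < PySem.List.len x ∧ p < PySem.List.len y) := by
      intro hc
      exact absurd (lt_min_iff.mpr hc) (not_lt.mpr hp1)
    rw [if_neg (by simpa [Bool.and_eq_true, decide_eq_true_eq] using this)]
  rw [hfirst, hsecond, add_zero]

lemma A_total_num (pop : List (List Int)) :
    ((PySem.List.pyRange 0 (PySem.List.len pop) 1).foldl
      (fun (s : Int × Int) i =>
        (PySem.List.pyRange (i + 1) (PySem.List.len pop) 1).foldl
          (fun (s : Int × Int) j =>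
            (s.1 + hamming_distance (PySem.List.pyGetD pop i [])
                (PySem.List.pyGetD pop j []),
             s.2 + 1)) s)
      (0, 0))
    = (pairRec hamming_distance pop, pairRec (fun _ _ => (1 : Int)) pop) := by
  have hfe : (fun (s : Int × Int) i =>
      (PySem.List.pyRange (i + 1) (PySem.List.len pop) 1).foldl
        (fun (s : Int × Int) j =>
          (s.1 + hamming_distance (PySem.List.pyGetD pop i []) (PySem.List.pyGetD pop j []),
           s.2 + 1)) s)
      = fun (s : Int × Int) i =>
        ((PySem.List.pyRange (i + 1) (PySem.List.len pop) 1).foldl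
          (fun t j => t + hamming_distance (PySem.List.pyGetD pop i [])
            (PySem.List.pyGetD pop j [])) s.1,
         (PySem.List.pyRange (i + 1) (PySem.List.len pop) 1).foldl
          (fun c _ => c + 1) s.2) := by
    funext s i
    exact PySem.List.foldl_prod_mk
      (f := fun t j => t + hamming_distance (PySem.List.pyGetD pop i [])
        (PySem.List.pyGetD pop j []))
      (g := fun c _ => c + 1) _ s.1 s.2
  rw [hfe, PySem.List.foldl_prod_mk
    (f := fun t i => (PySem.List.pyRange (i + 1) (PySem.List.len pop) 1).foldl
      (fun t j => t + hamming_distance (PySem.List.pyGetD pop i [])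
        (PySem.List.pyGetD pop j [])) t)
    (g := fun c i => (PySem.List.pyRange (i + 1) (PySem.List.len pop) 1).foldl
      (fun c _ => c + 1) c)]
  refine Prod.ext ?_ ?_
  · show (PySem.List.pyRange 0 (PySem.List.len pop) 1).foldl
      (fun t i => (PySem.List.pyRange (i + 1) (PySem.List.len pop) 1).foldl
        (fun t j => t + hamming_distance (PySem.List.pyGetD pop i [])
          (PySem.List.pyGetD pop j [])) t) 0
      = pairRec hamming_distance pop
    have hin : (fun (t : Int) (i : Int) =>
        (PySem.List.pyRange (i + 1) (PySem.List.len pop) 1).foldl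
          (fun t j => t + hamming_distance (PySem.List.pyGetD pop i [])
            (PySem.List.pyGetD pop j [])) t)
        = fun t i => t + ((PySem.List.pyRange (i + 1) (PySem.List.len pop) 1).map
          (fun j => hamming_distance (PySem.List.pyGetD pop i [])
            (PySem.List.pyGetD pop j []))).sum := by
      funext t i
      exact PySem.List.foldl_add _ _ _
    rw [hin, PySem.List.foldl_add, zero_add]
    exact double_loop_sum' hamming_distance [] pop
  · show (PySem.List.pyRange 0 (PySem.List.len pop) 1).foldl
      (fun c i => (PySem.List.pyRange (i + 1) (PySem.List.len pop) 1).foldl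
        (fun c _ => c + 1) c) 0
      = pairRec (fun _ _ => (1 : Int)) pop
    have hin : (fun (c : Int) (i : Int) =>
        (PySem.List.pyRange (i + 1) (PySem.List.len pop) 1).foldl (fun c _ => c + 1) c)
        = fun c i => c + ((PySem.List.pyRange (i + 1) (PySem.List.len pop) 1).map
          (fun _ => (1 : Int))).sum := by
      funext c i
      exact PySem.List.foldl_add _ _ _
    rw [hin, PySem.List.foldl_add, zero_add]
    exact double_loop_sum' (fun _ _ => (1 : Int)) [] pop

lemma B_total (pop : List (List Int)) :
    (PySem.List.pyRange 0
        (pop.foldl (fun m ind => if PySem.List.len ind > m then PySem.List.len ind else m) 0)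
        1).foldl
      (fun t p =>
        t + pairwiseAbsSum
          ((pop.filter (fun ind => decide (p < PySem.List.len ind))).map
            (fun ind => PySem.List.pyGetD ind p 0)))
      (pairwiseAbsSum (pop.map (fun ind => PySem.List.len ind)))
    = pairRec hamming_distance pop := by
  have hMb := max_len_spec pop
  set M := pop.foldl (fun m ind => if PySem.List.len ind > m then PySem.List.len ind else m) 0
    with hM
  rw [PySem.List.foldl_add]
  have h1 : pairwiseAbsSum (pop.map (fun ind => PySem.List.len ind))
      = pairRec (fun x y => |PySem.List.len x - PySem.List.len y|) pop := by
    rw [pairwiseAbsSum_eq, pairRec_map]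
  have h2 : ((PySem.List.pyRange 0 M 1).map
      (fun p => pairwiseAbsSum
        ((pop.filter (fun ind => decide (p < PySem.List.len ind))).map
          (fun ind => PySem.List.pyGetD ind p 0)))).sum
      = pairRec (fun x y => ((PySem.List.pyRange 0 M 1).map
          (fun p => if decide (p < PySem.List.len x) && decide (p < PySem.List.len y)
            then |PySem.List.pyGetD x p 0 - PySem.List.pyGetD y p 0| else 0)).sum) pop := by
    rw [← pairRec_list_sum]
    refine congrArg List.sum (List.map_congr_left (fun p _ => ?_))
    rw [pairwiseAbsSum_eq, pairRec_map, pairRec_filter]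
  rw [h1, h2, pairRec_add]
  refine pairRec_congr (fun x hx y hy => ?_)
  rw [column_contrib x y M (hMb x hx) (hMb y hy), ← hamming_distance_eq]

-- ===== VERDICT (by name: the statement is the Claim_ definition above) =====
theorem population_diversity_spec : Claim_equal_population_diversity := by
  intro population _ _
  unfold Spec_population_diversity
  simp only [population_diversity, population_diversity_alt, A_total_num]
  rw [B_total, num_pairs_eq]
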